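-- pv_equiv track=rewrite | github.com/lanchunyuan/Python | PythonCrashCourse/chapter-8/8-11.py | make_great
-- ===== SOURCE A (Python) =====
-- def make_great(magicians):
--
--     great_magicians = []
--
--     while magicians:
--         magician = magicians.pop()
--         great_magician = magician + ' The Great'
--         great_magicians.append(great_magician)
--
--     for great_magician in great_magicians:
--         magicians.append(great_magician)
--     return magicians
-- ===== SOURCE B (Python) =====
-- def make_great(magicians):
--     magicians.reverse()
--     for i in range(len(magicians)):
--         magicians[i] = magicians[i] + ' The Great'
--     return magicians
-- ===== Notes on version B (the rewrite author's own statement) =====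
-- stated objective: simpler
-- what changed: Replaces A's pop-into-accumulator loop plus a replay loop appending back onto the emptied list with a single in-place reverse() followed by one index-assignment pass; no second list is built.
import Mathlib
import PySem

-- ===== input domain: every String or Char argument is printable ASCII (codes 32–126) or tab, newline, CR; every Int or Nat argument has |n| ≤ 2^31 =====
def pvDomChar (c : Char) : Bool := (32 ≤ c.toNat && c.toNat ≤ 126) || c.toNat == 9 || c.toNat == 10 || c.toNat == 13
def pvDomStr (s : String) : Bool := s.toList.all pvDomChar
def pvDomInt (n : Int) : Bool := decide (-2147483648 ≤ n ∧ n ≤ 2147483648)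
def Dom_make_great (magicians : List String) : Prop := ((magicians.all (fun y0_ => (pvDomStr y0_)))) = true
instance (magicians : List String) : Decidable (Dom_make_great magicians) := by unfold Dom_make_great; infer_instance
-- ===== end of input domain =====

-- B replaces A's pop-into-accumulator loop plus replay loop with an in-place reverse
-- and one index-assignment pass; return-value equivalence is what is proved (A also
-- mutates the argument list in place in Python; B performs the same final mutation).

-- ===== PORT A =====
-- while magicians: magician = magicians.pop(); great_magicians.append(magician + ' The Great')
def makeGreatLoop (ms : List String) (acc : List String) : List String :=
  match h : ms with
  | [] => acc
  | _ :: _ =>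
    let magician := ms.getLast (by simp [h])
    makeGreatLoop ms.dropLast (acc ++ [magician ++ " The Great"])
termination_by ms.length
decreasing_by simp [h, List.length_dropLast]

def make_great (magicians : List String) : List String :=
  let great_magicians := makeGreatLoop magicians []
  -- for great_magician in great_magicians: magicians.append(great_magician); return magicians
  [] ++ great_magicians

-- ===== PORT B =====
def make_great_alt (magicians : List String) : List String :=
  let r := magicians.reverse
  (List.range r.length).foldl (fun acc i => acc.set i ((acc.getD i "") ++ " The Great")) r

-- ===== PRECONDITION & SPEC =====
def Spec_make_great (magicians : List String) (out : List String) : Prop := out = make_great_alt magicians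
instance (magicians : List String) (out : List String) : Decidable (Spec_make_great magicians out) := by unfold Spec_make_great; infer_instance

-- ===== CLAIM (what is proved, stated in full; the proofs are below) =====
def Claim_equal_make_great : Prop := ∀ (magicians : List String), Dom_make_great magicians → Spec_make_great magicians (make_great magicians)

-- ===== LEMMAS AND PROOFS =====
theorem makeGreatLoop_eq (ms acc : List String) :
    makeGreatLoop ms acc = acc ++ ms.reverse.map (· ++ " The Great") := by
  induction ms, acc using makeGreatLoop.induct with
  | case1 => simp [makeGreatLoop]
  | case2 acc head tail _ ih =>
    rw [makeGreatLoop]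
    rw [ih]
    have : head :: tail = (head :: tail).dropLast ++ [(head :: tail).getLast (by simp)] :=
      (List.dropLast_append_getLast _).symm
    conv_rhs => rw [this]
    simp
    rfl

theorem setLoop_eq (r : List String) (n : ℕ) (hn : n ≤ r.length) :
    (List.range n).foldl (fun acc i => acc.set i ((acc.getD i "") ++ " The Great")) r
      = (r.take n).map (· ++ " The Great") ++ r.drop n := by
  induction n with
  | zero => simp
  | succ n ih =>
    rw [List.range_succ, List.foldl_append, ih (Nat.le_of_succ_le hn)]
    simp only [List.foldl_cons, List.foldl_nil]
    have hlt : n < r.length := hn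
    have hget : ((r.take n).map (· ++ " The Great") ++ r.drop n).getD n ""
        = r.getD n "" := by
      rw [List.getD_eq_getElem?_getD, List.getElem?_append_right (by simp)]
      simp [List.getElem?_drop, List.getD_eq_getElem?_getD, Nat.min_eq_left (Nat.le_of_lt hlt)]
    rw [hget]
    apply List.ext_getElem
    · simp; omega
    · intro i h1 h2
      by_cases hi : i = n
      · subst hi
        rw [List.getElem_set_self, List.getElem_append_left (by simp; omega)]
        simp [List.getD_eq_getElem?_getD, List.getElem?_eq_getElem hlt]
      · rw [List.getElem_set_ne (by omega)]
        by_cases hin : i < n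
        · rw [List.getElem_append_left (by simp; omega),
            List.getElem_append_left (by simp; omega)]
          simp [List.getElem_take]
        · rw [List.getElem_append_right (by simp; omega),
            List.getElem_append_right (by simp; omega)]
          simp
          congr 1
          omega

-- ===== VERDICT (by name: the statement is the Claim_ definition above) =====
theorem make_great_spec : Claim_equal_make_great := by
  intro magicians _
  unfold Spec_make_great make_great make_great_alt
  rw [makeGreatLoop_eq]
  rw [setLoop_eq magicians.reverse magicians.reverse.length (le_refl _)]
  simp only [List.take_length, List.drop_length, List.append_nil, List.nil_append]
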